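-- pv_equiv track=rewrite | github.com/njznn/Model-analysis-1 | 14 hexagonal potts model/narisi.py | generate_sequence_lihi
-- ===== SOURCE A (Python) =====
-- def generate_sequence_lihi(length):
--     sequence = [0]
--     num = 0
--     increment = 3
--
--     for i in range(length//2):
--         num += increment
--         sequence.append(num)
--         num +=1
--         sequence.append(num)
--
--
--     return sequence[:-1]
-- ===== SOURCE B (Python) =====
-- def generate_sequence_lihi(length):
--     return [2 * i + (i % 2) for i in range(2 * (length // 2))]
-- ===== Notes on version B (the rewrite author's own statement) =====
-- stated objective: simpler
-- what changed: Replaces the accumulator loop (running num with alternating increments, two appends per iteration, then dropping the last element) with a stateless comprehension computing each element directly from its index by a closed-form formula.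
import Mathlib
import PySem

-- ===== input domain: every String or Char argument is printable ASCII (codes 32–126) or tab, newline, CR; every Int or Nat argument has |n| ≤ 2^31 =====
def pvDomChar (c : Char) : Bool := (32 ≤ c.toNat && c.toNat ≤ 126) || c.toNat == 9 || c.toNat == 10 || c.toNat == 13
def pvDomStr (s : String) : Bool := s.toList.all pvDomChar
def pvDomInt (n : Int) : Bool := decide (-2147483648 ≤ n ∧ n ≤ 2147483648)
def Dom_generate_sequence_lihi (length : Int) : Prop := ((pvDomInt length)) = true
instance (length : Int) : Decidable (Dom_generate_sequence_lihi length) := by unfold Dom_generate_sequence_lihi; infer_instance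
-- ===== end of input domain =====

-- B replaces A's accumulator loop with a closed-form index formula 2*i + i%2 (simpler).


-- ===== PORT A =====
-- loop body: num += increment; sequence.append(num); num += 1; sequence.append(num)
def pvBodyA (st : List Int × Int × Int) (_i : Int) : List Int × Int × Int :=
  let (sequence, num, increment) := st
  let num := num + increment
  let sequence := sequence ++ [num]
  let num := num + 1
  (sequence ++ [num], num, increment)

def generate_sequence_lihi (length : Int) : List Int :=
  let st := (PySem.List.pyRange 0 (PySem.Int.floordiv length 2) 1).foldl pvBodyA ([0], 0, 3)
  PySem.List.slice st.1 none (some (-1))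

-- ===== PORT B =====
def generate_sequence_lihi_alt (length : Int) : List Int :=
  (PySem.List.pyRange 0 (2 * PySem.Int.floordiv length 2) 1).map
    (fun i => 2 * i + PySem.Int.mod i 2)

-- ===== PRECONDITION & SPEC =====
def Spec_generate_sequence_lihi (length : Int) (out : List Int) : Prop := out = generate_sequence_lihi_alt length
instance (length : Int) (out : List Int) : Decidable (Spec_generate_sequence_lihi length out) := by unfold Spec_generate_sequence_lihi; infer_instance

-- ===== CLAIM (what is proved, stated in full; the proofs are below) =====
def Claim_equal_generate_sequence_lihi : Prop := ∀ (length : Int), Dom_generate_sequence_lihi length → Spec_generate_sequence_lihi length (generate_sequence_lihi length)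

-- ===== LEMMAS AND PROOFS =====

-- the closed-form element formula, as a function of a Nat index
def pvG (i : Nat) : Int := 2 * (i : Int) + PySem.Int.mod (i : Int) 2

lemma pvG_even (n : Nat) : pvG (2 * n) = 4 * (n : Int) := by
  simp [pvG, PySem.Int.mod]
  omega

lemma pvG_odd (n : Nat) : pvG (2 * n + 1) = 4 * (n : Int) + 3 := by
  simp [pvG, PySem.Int.mod]
  omega

-- the loop body ignores the loop variable, so the fold is an iterate of length many steps
lemma foldl_bodyA {α : Type} (l : List α) (st : List Int × Int × Int) :
    l.foldl (fun s (_ : α) => pvBodyA s 0) st = (fun s => pvBodyA s 0)^[l.length] st := by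
  induction l generalizing st with
  | nil => simp
  | cons a l ih =>
      simp [List.foldl_cons, ih, Function.iterate_succ_apply]

-- state after n iterations: full sequence is the formula over range (2n+1), num = 4n
lemma iterate_bodyA (n : Nat) :
    (fun s => pvBodyA s 0)^[n] ([0], 0, 3) =
      ((List.range (2 * n + 1)).map pvG, 4 * (n : Int), 3) := by
  induction n with
  | zero => simp [List.range_succ, pvG, PySem.Int.mod]
  | succ n ih =>
      rw [Function.iterate_succ_apply', ih]
      have e1 : (List.range (2 * (n + 1) + 1)).map pvG
          = (List.range (2 * n + 1)).map pvG ++ [pvG (2 * n + 1), pvG (2 * n + 2)] := by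
        have h1 : 2 * (n + 1) + 1 = ((2 * n + 1) + 1) + 1 := by omega
        rw [h1, List.range_succ, List.range_succ]
        simp
      have e2 : pvG (2 * n + 2) = 4 * (n : Int) + 4 := by
        have : 2 * n + 2 = 2 * (n + 1) := by omega
        rw [this, pvG_even]; push_cast; ring
      rw [e1, pvG_odd, e2]
      simp only [pvBodyA]
      refine Prod.ext ?_ (Prod.ext ?_ rfl)
      · simp
        ring
      · push_cast; ring

lemma dropLast_map_range (n : Nat) :
    ((List.range (n + 1)).map pvG).dropLast = (List.range n).map pvG := by
  simp [List.range_succ]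

theorem generate_sequence_lihi_spec : Claim_equal_generate_sequence_lihi := by
  intro length _
  unfold Spec_generate_sequence_lihi generate_sequence_lihi generate_sequence_lihi_alt
  set k := PySem.Int.floordiv length 2 with hk
  rw [PySem.List.pyRange_one, PySem.List.pyRange_one]
  rw [List.foldl_map, show (fun (s : List Int × Int × Int) (x : Nat) => pvBodyA s (0 + ↑x)) = (fun s (_ : Nat) => pvBodyA s 0) from by funext s x; simp [pvBodyA]]
  rw [foldl_bodyA, List.length_range, iterate_bodyA]
  simp only [PySem.List.slice_to_neg_one]
  rw [dropLast_map_range]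
  have h : (2 * k - 0).toNat = 2 * (k - 0).toNat := by omega
  rw [h, List.map_map]
  congr 1
  funext i
  simp [pvG]
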